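-- pv_equiv track=rewrite | github.com/Rajarshi1-source/Modern_Password_Manager01 | password_manager/security/services/dna_encoder.py | _restore_homopolymers
-- ===== SOURCE A (Python) =====
-- def _restore_homopolymers(sequence: str) -> str:
--     """Remove spacer nucleotides inserted for homopolymer breaking."""
--     result = []
--     i = 0
--     while i < len(sequence):
--         if i + 1 < len(sequence) and sequence[i+1] == 'N':
--             # Skip spacer and marker
--             i += 2
--         else:
--             result.append(sequence[i])
--             i += 1
--     return ''.join(result)
-- ===== SOURCE B (Python) =====
-- def _restore_homopolymers(sequence: str) -> str:
--     """Remove spacer nucleotides inserted for homopolymer breaking."""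
--     out = []
--     pending = None
--     for c in sequence:
--         if c == 'N' and pending is not None:
--             # the pending char was a spacer; it and this 'N' marker vanish
--             pending = None
--         else:
--             if pending is not None:
--                 out.append(pending)
--             pending = c
--     if pending is not None:
--         out.append(pending)
--     return ''.join(out)
-- ===== Notes on version B (the rewrite author's own statement) =====
-- stated objective: simpler
-- what changed: Replaced the index-cursor while-loop with lookahead and i+=2 jumps by a single forward pass keeping one pending character, which the spacer marker character cancels and any other character flushes.
import Mathlib
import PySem

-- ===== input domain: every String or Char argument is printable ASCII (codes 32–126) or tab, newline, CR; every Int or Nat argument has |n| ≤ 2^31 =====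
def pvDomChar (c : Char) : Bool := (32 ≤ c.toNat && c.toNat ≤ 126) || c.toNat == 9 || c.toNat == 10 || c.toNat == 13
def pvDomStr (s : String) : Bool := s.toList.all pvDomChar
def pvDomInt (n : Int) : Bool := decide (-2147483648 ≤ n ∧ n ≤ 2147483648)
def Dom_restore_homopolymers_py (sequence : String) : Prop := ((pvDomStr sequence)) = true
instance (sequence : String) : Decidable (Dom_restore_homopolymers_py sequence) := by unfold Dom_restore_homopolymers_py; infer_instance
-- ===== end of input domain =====

-- B replaces A's index-cursor while-loop by a single pass holding one pending character
-- (objective: simpler, one state machine, no index arithmetic); same return value.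

-- ===== PORT A =====
-- A's while-loop: cursor i, growing `result` list; if the NEXT char is 'N', jump i by 2,
-- else append the current char and advance by 1.
def pvALoop (cs : List Char) (i : Nat) (result : List Char) : List Char :=
  if h : i < cs.length then
    if h2 : i + 1 < cs.length ∧ cs[i + 1]? = some 'N' then
      pvALoop cs (i + 2) result
    else
      pvALoop cs (i + 1) (result ++ [cs[i]'h])
  else
    result
termination_by cs.length - i

def restore_homopolymers_py (sequence : String) : String :=
  String.ofList (pvALoop sequence.toList 0 [])

-- ===== PORT B =====
-- B's loop body: state (pending, out); an 'N' cancels the pending char, otherwise the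
-- pending char is flushed to out and the current char becomes pending.
def pvBStep (st : Option Char × List Char) (c : Char) : Option Char × List Char :=
  if c = 'N' ∧ st.1.isSome then
    (none, st.2)
  else
    match st.1 with
    | some p => (some c, st.2 ++ [p])
    | none => (some c, st.2)

def restore_homopolymers_py_alt (sequence : String) : String :=
  let st := sequence.toList.foldl pvBStep (none, [])
  String.ofList (st.2 ++ st.1.toList)

-- ===== PRECONDITION & SPEC =====
def Spec_restore_homopolymers_py (sequence : String) (out : String) : Prop := out = restore_homopolymers_py_alt sequence
instance (sequence : String) (out : String) : Decidable (Spec_restore_homopolymers_py sequence out) := by unfold Spec_restore_homopolymers_py; infer_instance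

-- ===== CLAIM (what is proved, stated in full; the proofs are below) =====
def Claim_equal_restore_homopolymers_py : Prop := ∀ (sequence : String), Dom_restore_homopolymers_py sequence → Spec_restore_homopolymers_py sequence (restore_homopolymers_py sequence)

-- ===== LEMMAS AND PROOFS =====

-- Reference function: remove each (char, 'N') pair, scanning left to right.
def pvRef : List Char → List Char
  | [] => []
  | [c] => [c]
  | c :: d :: rest => if d = 'N' then pvRef rest else c :: pvRef (d :: rest)

lemma pvALoop_eq_ref : ∀ (k : Nat) (cs : List Char) (i : Nat) (acc : List Char),
    cs.length - i ≤ k → pvALoop cs i acc = acc ++ pvRef (cs.drop i) := by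
  intro k
  induction k with
  | zero =>
    intro cs i acc hk
    have hge : cs.length ≤ i := by omega
    rw [pvALoop, dif_neg (by omega), List.drop_eq_nil_of_le hge]
    simp [pvRef]
  | succ k ih =>
    intro cs i acc hk
    by_cases h : i < cs.length
    · have hdrop : cs.drop i = cs[i] :: cs.drop (i + 1) := List.drop_eq_getElem_cons h
      by_cases h1 : i + 1 < cs.length
      · have hdrop1 : cs.drop (i + 1) = cs[i + 1] :: cs.drop (i + 2) :=
          List.drop_eq_getElem_cons h1
        have hopt : cs[i + 1]? = some cs[i + 1] := List.getElem?_eq_getElem h1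
        by_cases hN : cs[i + 1] = 'N'
        · rw [pvALoop, dif_pos h, dif_pos ⟨h1, by rw [hopt, hN]⟩, ih cs (i + 2) acc (by omega),
            hdrop, hdrop1, pvRef, if_pos hN]
        · rw [pvALoop, dif_pos h,
            dif_neg (by intro hc; rw [hopt] at hc; exact hN (Option.some_injective _ hc.2)),
            ih cs (i + 1) (acc ++ [cs[i]]) (by omega), hdrop, hdrop1, pvRef,
            if_neg hN, ← hdrop1]
          simp
      · have hlast : cs.drop (i + 1) = [] := List.drop_eq_nil_of_le (by omega)
        rw [pvALoop, dif_pos h, dif_neg (by intro hc; exact absurd hc.1 h1),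
          ih cs (i + 1) (acc ++ [cs[i]]) (by omega), hdrop, hlast]
        simp [pvRef]
    · rw [pvALoop, dif_neg h, List.drop_eq_nil_of_le (by omega)]
      simp [pvRef]

lemma pvBFold_eq_ref : ∀ (l : List Char) (p : Option Char) (out : List Char),
    (let st := l.foldl pvBStep (p, out); st.2 ++ st.1.toList) = out ++ pvRef (p.toList ++ l) := by
  intro l
  induction l with
  | nil =>
    intro p out
    cases p <;> simp [pvRef]
  | cons c rest ih =>
    intro p out
    cases p with
    | none =>
      simp only [List.foldl_cons, pvBStep, Option.isSome_none, Bool.false_eq_true, and_false,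
        if_false]
      simpa using ih (some c) out
    | some p' =>
      by_cases hN : c = 'N'
      · simp only [List.foldl_cons, pvBStep, Option.isSome_some, and_true, hN]
        have := ih none out
        simpa [pvRef, hN] using this
      · simp only [List.foldl_cons, pvBStep, Option.isSome_some, and_true, if_neg hN]
        have := ih (some c) (out ++ [p'])
        simp only [Option.toList_some, List.singleton_append] at this ⊢
        rw [this, pvRef, if_neg hN]
        simp

-- ===== VERDICT (by name: the statement is the Claim_ definition above) =====
theorem restore_homopolymers_py_spec : Claim_equal_restore_homopolymers_py := by
  intro s _
  unfold Spec_restore_homopolymers_py restore_homopolymers_py restore_homopolymers_py_alt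
  rw [pvALoop_eq_ref s.toList.length s.toList 0 [] (by omega)]
  have := pvBFold_eq_ref s.toList none []
  simp only [Option.toList_none, List.nil_append] at this
  simp [this]
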